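-- pv_equiv track=rewrite | github.com/sshreya99/Interview-OA | Prep/Amazon OAs/OA7.py | maximize_score
-- ===== SOURCE A (Python) =====
-- def maximize_score(initial_str):
--     """
--     Finds the maximum number of operations that can be performed on the string
--     while ensuring its type remains the same as the initial string's type.
--
--     Args:
--         initial_str (str): The initial product identifier string.
--
--     Returns:
--         int: The maximum number of valid operations.
--     """
--     if len(initial_str) == 0:
--         return 0
--
--     res = 0
--     start_char = initial_str[0]
--     end_char = initial_str[-1]
--     s = 0
--
--     for i, c in enumerate(initial_str):
--         if c == start_char:
--             s = i
--         elif c == end_char: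
--             res = max(res, s + len(initial_str) - 1 - i)
--
--         if start_char == end_char:
--             res = max(res, i + len(initial_str) - 1 - i)
--
--     return res
-- ===== SOURCE B (Python) =====
-- def maximize_score(initial_str):
--     """Index-list + two-pointer re-implementation: collect the sorted lists of
--     start-char and end-char positions, then merge them with a two-pointer sweep,
--     pairing each end position with the latest start position before it."""
--     n = len(initial_str)
--     if n == 0:
--         return 0
--     a = initial_str[0]
--     b = initial_str[-1]
--     if a == b:
--         return n - 1
--     starts = [i for i, c in enumerate(initial_str) if c == a]
--     ends = [i for i, c in enumerate(initial_str) if c == b]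
--     res = 0
--     p = 0
--     last = 0
--     for e in ends:
--         while p < len(starts) and starts[p] < e:
--             last = starts[p]
--             p += 1
--         res = max(res, last + n - 1 - e)
--     return res
-- ===== Notes on version B (the rewrite author's own statement) =====
-- stated objective: alternative
-- what changed: B first extracts the sorted index lists of start-char and end-char occurrences with two comprehensions and then merges them with a two-pointer sweep (advancing a shared pointer over the start list per end index), plus an O(1) early return when first and last chars coincide, instead of A's single enumerate loop with per-character branching and a per-iteration equal-chars check.
import Mathlib
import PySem

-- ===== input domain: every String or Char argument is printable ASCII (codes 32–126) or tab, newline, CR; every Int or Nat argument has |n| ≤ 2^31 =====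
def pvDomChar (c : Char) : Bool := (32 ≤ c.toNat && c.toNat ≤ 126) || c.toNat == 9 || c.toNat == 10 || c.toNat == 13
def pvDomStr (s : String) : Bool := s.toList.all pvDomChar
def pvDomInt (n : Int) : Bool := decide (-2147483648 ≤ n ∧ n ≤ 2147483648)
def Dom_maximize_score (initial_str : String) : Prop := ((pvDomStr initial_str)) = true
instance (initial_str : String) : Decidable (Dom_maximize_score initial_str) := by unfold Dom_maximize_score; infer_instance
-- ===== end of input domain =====

-- B extracts the sorted index lists of start-char / end-char occurrences and merges them with a
-- two-pointer sweep (latest start before each end), instead of A's single enumerate loop.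

-- ===== PORT A =====
def maximize_score (initial_str : String) : Int :=
  let cs := initial_str.toList
  if cs.length = 0 then 0
  else
    let n : Int := cs.length
    let start_char := PySem.List.pyGetD cs 0 ' '    -- initial_str[0]; in range by the guard
    let end_char := PySem.List.pyGetD cs (-1) ' '   -- initial_str[-1]; in range by the guard
    let st := (PySem.List.enumerate cs 0).foldl (fun (p : Int × Int) ic =>
        let p1 : Int × Int :=
          if ic.2 = start_char then (p.1, ic.1)
          else if ic.2 = end_char then (max p.1 (p.2 + n - 1 - ic.1), p.2)
          else p
        if start_char = end_char then (max p1.1 (ic.1 + n - 1 - ic.1), p1.2) else p1)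
      (0, 0)
    st.1

-- ===== PORT B =====
-- the inner `while p < len(starts) and starts[p] < e` loop: the pointer position is represented
-- by the remaining suffix of `starts`, the state is (last, suffix)
def pvAdvance (e : Int) (last : Int) : List Int → Int × List Int
  | [] => (last, [])
  | s :: rest => if s < e then pvAdvance e s rest else (last, s :: rest)

def maximize_score_alt (initial_str : String) : Int :=
  let cs := initial_str.toList
  let n : Int := cs.length
  if n = 0 then 0
  else
    let a := PySem.List.pyGetD cs 0 ' '    -- in range by the guard
    let b := PySem.List.pyGetD cs (-1) ' ' -- in range by the guard
    if a = b then n - 1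
    else
      let starts := (PySem.List.enumerate cs 0).filterMap
        (fun ic => if ic.2 = a then some ic.1 else none)
      let ends := (PySem.List.enumerate cs 0).filterMap
        (fun ic => if ic.2 = b then some ic.1 else none)
      let st := ends.foldl (fun (st : Int × Int × List Int) e =>
          let lr := pvAdvance e st.2.1 st.2.2
          (max st.1 (lr.1 + n - 1 - e), lr.1, lr.2)) (0, 0, starts)
      st.1

-- ===== PRECONDITION & SPEC =====
def Spec_maximize_score (initial_str : String) (out : Int) : Prop := out = maximize_score_alt initial_str
instance (initial_str : String) (out : Int) : Decidable (Spec_maximize_score initial_str out) := by unfold Spec_maximize_score; infer_instance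

-- ===== CLAIM (what is proved, stated in full; the proofs are below) =====
def Claim_equal_maximize_score : Prop := ∀ (initial_str : String), Dom_maximize_score initial_str → Spec_maximize_score initial_str (maximize_score initial_str)

-- ===== LEMMAS AND PROOFS =====

-- A's loop as a prefix-length recursion: state after processing indices < k.
def pvFA (l : List Char) (a b : Char) (n : Int) : Nat → Int × Int
  | 0 => (0, 0)
  | k + 1 =>
    let p := pvFA l a b n k
    let c := l.getD k ' '
    let p1 : Int × Int :=
      if c = a then (p.1, (k : Int))
      else if c = b then (max p.1 (p.2 + n - 1 - (k : Int)), p.2)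
      else p
    if a = b then (max p1.1 ((k : Int) + n - 1 - (k : Int)), p1.2) else p1

theorem pvFA_stable (l : List Char) (c : Char) (a b : Char) (n : Int) :
    ∀ k, k ≤ l.length → pvFA (l ++ [c]) a b n k = pvFA l a b n k := by
  intro k hk
  induction k with
  | zero => rfl
  | succ k ih =>
    have hk' : k < l.length := by omega
    simp only [pvFA, ih (by omega), List.getD_append _ _ _ _ hk']

theorem pvA_foldl_eq (l : List Char) (a b : Char) (n : Int) :
    (PySem.List.enumerate l 0).foldl (fun (p : Int × Int) ic =>
        let p1 : Int × Int :=
          if ic.2 = a then (p.1, ic.1)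
          else if ic.2 = b then (max p.1 (p.2 + n - 1 - ic.1), p.2)
          else p
        if a = b then (max p1.1 (ic.1 + n - 1 - ic.1), p1.2) else p1)
      (0, 0) = pvFA l a b n l.length := by
  induction l using List.reverseRecOn with
  | nil => rfl
  | append_singleton t c ih =>
    rw [PySem.List.enumerate_append, List.foldl_append, ih]
    have hst := pvFA_stable t c a b n t.length le_rfl
    have hg : (t ++ [c]).getD t.length ' ' = c := by
      simp [List.getD_eq_getElem?_getD]
    simp only [List.length_append, List.length_cons, List.length_nil,
      PySem.List.enumerate_cons, PySem.List.enumerate_nil, List.foldl_cons, List.foldl_nil]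
    conv_rhs => rw [pvFA]
    rw [hst, hg]
    simp

-- the a = b case: A's loop returns n - 1 (n ≥ 1)
theorem pvFA_eq_of_eq (l : List Char) (a : Char) (n : Int) (hn : 1 ≤ n) :
    ∀ k, 1 ≤ k → (pvFA l a a n k).1 = n - 1 := by
  intro k hk
  induction k with
  | zero => omega
  | succ k ih =>
    by_cases hk0 : k = 0
    · subst hk0
      simp only [pvFA]
      split_ifs <;> simp_all <;> omega
    · have h1 := ih (by omega)
      simp only [pvFA]
      split_ifs <;> simp_all <;> omega

-- characterization of A's s-accumulator: latest start index < k
theorem pvFA_s_char (l : List Char) (a b : Char) (n : Int)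
    (hl0 : l.getD 0 ' ' = a) :
    ∀ k, 1 ≤ k → ∃ j : Nat, (pvFA l a b n k).2 = (j : Int) ∧ j < k ∧ l.getD j ' ' = a ∧
      (∀ m : Nat, m < k → l.getD m ' ' = a → m ≤ j) := by
  intro k hk
  induction k with
  | zero => omega
  | succ k ih =>
    by_cases hk0 : k = 0
    · subst hk0
      refine ⟨0, ?_, by omega, hl0, fun m hm _ => by omega⟩
      simp only [pvFA, hl0]
      split_ifs <;> simp
    · obtain ⟨j, hj, hjk, hja, hmax⟩ := ih (by omega)
      simp only [pvFA]
      by_cases hca : l.getD k ' ' = a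
      · refine ⟨k, ?_, by omega, hca, fun m hm _ => by omega⟩
        simp only [hca]
        split_ifs <;> simp
      · refine ⟨j, ?_, by omega, hja, ?_⟩
        · split_ifs <;> simp_all
        · intro m hm hma
          rcases Nat.lt_succ_iff_lt_or_eq.mp hm with h | h
          · exact hmax m h hma
          · subst h; exact absurd hma hca

theorem pvFA_res_nonneg (l : List Char) (a b : Char) (n : Int) :
    ∀ k, 0 ≤ (pvFA l a b n k).1 := by
  intro k
  induction k with
  | zero => simp [pvFA]
  | succ k ih =>
    simp only [pvFA]
    split_ifs <;> (try simp) <;> omega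

theorem pvFA_res_mono (l : List Char) (a b : Char) (n : Int) (k : Nat) :
    (pvFA l a b n k).1 ≤ (pvFA l a b n (k+1)).1 := by
  simp only [pvFA]
  split_ifs <;> (try simp) <;> omega

theorem pvFA_res_lb (l : List Char) (a b : Char) (n : Int) (hab : a ≠ b) :
    ∀ k i : Nat, i < k → l.getD i ' ' = b →
      (pvFA l a b n i).2 + n - 1 - (i : Int) ≤ (pvFA l a b n k).1 := by
  intro k
  induction k with
  | zero => intro i hi; omega
  | succ k ih =>
    intro i hi hib
    rcases Nat.lt_succ_iff_lt_or_eq.mp hi with h | h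
    · exact le_trans (ih i h hib) (pvFA_res_mono l a b n k)
    · subst h
      have hba : ¬ l.getD i ' ' = a := by rw [hib]; exact fun h => hab h.symm
      simp only [pvFA, if_neg hba, if_pos hib, if_neg hab]
      simp

theorem pvFA_res_ub (l : List Char) (a b : Char) (n : Int) (X : Int) (hab : a ≠ b) (hX : 0 ≤ X)
    (H : ∀ i : Nat, i < l.length → l.getD i ' ' = b → (pvFA l a b n i).2 + n - 1 - (i : Int) ≤ X) :
    ∀ k, k ≤ l.length → (pvFA l a b n k).1 ≤ X := by
  intro k
  induction k with
  | zero => intro _; simpa [pvFA] using hX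
  | succ k ih =>
    intro hk
    have ih' := ih (by omega)
    simp only [pvFA, if_neg hab]
    split_ifs with h1 h2
    · exact ih'
    · have := H k (by omega) h2
      simp only [max_le_iff]
      exact ⟨ih', this⟩
    · exact ih'

-- ---------- B side ----------

-- the occurrence-index list of a character
def pvIdxs (l : List Char) (a : Char) : List Int :=
  (PySem.List.enumerate l 0).filterMap (fun ic => if ic.2 = a then some ic.1 else none)

theorem pvIdxs_mem (l : List Char) (a : Char) (x : Int) :
    x ∈ pvIdxs l a ↔ ∃ k : Nat, k < l.length ∧ x = (k : Int) ∧ l.getD k ' ' = a := by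
  simp only [pvIdxs, List.mem_filterMap, PySem.List.mem_enumerate_iff]
  constructor
  · rintro ⟨p, ⟨k, hk, rfl⟩, hsome⟩
    simp only at hsome
    split_ifs at hsome with hc
    · refine ⟨k, hk, by simpa using hsome.symm, by rw [List.getD_eq_getElem _ _ hk]; exact hc⟩
  · rintro ⟨k, hk, rfl, hc⟩
    refine ⟨((k : Int), l[k]), ⟨k, hk, by simp⟩, ?_⟩
    rw [List.getD_eq_getElem _ _ hk] at hc
    simp [hc]

theorem pvIdxs_sorted (l : List Char) (a : Char) : (pvIdxs l a).Pairwise (· < ·) := by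
  apply List.Pairwise.filterMap
  · intro p q hpq x hx y hy
    simp only at hx hy
    split_ifs at hx hy
    · simp only [Option.some_inj] at hx hy
      rw [← hx, ← hy]; exact hpq
  · exact PySem.List.pairwise_lt_enumerate l 0

-- the largest start index below e (0 when none): what the two-pointer `last` tracks
def pvLB (l : List Char) (a : Char) (e : Int) : Int :=
  ((pvIdxs l a).filter (fun s => decide (s < e))).foldl max 0

-- the two-pointer-sweep value of one end index
def pvG (l : List Char) (a : Char) (n : Int) (e : Int) : Int := pvLB l a e + n - 1 - e

-- advance preserves the prefix/suffix split of starts and lands exactly at e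
theorem pvAdvance_char (l : List Char) (a : Char) (e : Int) :
    ∀ (R P : List Int) (L : Int), pvIdxs l a = P ++ R → (∀ x ∈ P, x < e) →
      L = P.foldl max 0 →
      ∃ P', pvIdxs l a = P' ++ (pvAdvance e L R).2 ∧ (∀ x ∈ P', x < e) ∧
        (pvAdvance e L R).1 = P'.foldl max 0 ∧ (∀ y ∈ (pvAdvance e L R).2, e ≤ y) := by
  intro R
  induction R with
  | nil =>
    intro P L hsplit hP hL
    exact ⟨P, by simpa [pvAdvance] using hsplit, hP, by simpa [pvAdvance] using hL, by simp [pvAdvance]⟩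
  | cons s rest ih =>
    intro P L hsplit hP hL
    have hsorted := pvIdxs_sorted l a
    rw [hsplit] at hsorted
    have hPs : ∀ x ∈ P, x < s := by
      intro x hx
      exact (List.pairwise_append.mp hsorted).2.2 x hx s (by simp)
    have hs0 : (0 : Int) ≤ s := by
      have hsmem : s ∈ pvIdxs l a := by rw [hsplit]; simp
      obtain ⟨k, _, rfl, _⟩ := (pvIdxs_mem l a s).mp hsmem
      positivity
    by_cases hse : s < e
    · have hfold : s = (P ++ [s]).foldl max 0 := by
        rw [List.foldl_append]
        simp only [List.foldl_cons, List.foldl_nil]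
        rcases PySem.List.foldl_max_mem P (0 : Int) with h | h
        · rw [h]; omega
        · have := hPs _ h; omega
      have := ih (P ++ [s]) s (by simpa using hsplit)
        (by intro x hx; rcases List.mem_append.mp hx with h | h
            · exact hP x h
            · simp at h; omega) hfold
      simpa [pvAdvance, hse] using this
    · refine ⟨P, ?_, hP, ?_, ?_⟩
      · simpa [pvAdvance, hse] using hsplit
      · simpa [pvAdvance, hse] using hL
      · simp only [pvAdvance, if_neg hse]
        intro y hy
        rcases List.mem_cons.mp hy with h | h
        · omega
        · have : s < y := (List.pairwise_cons.mp (List.pairwise_append.mp hsorted).2.1).1 y h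
          omega

-- with the split, last = largest start below e
theorem pvLB_of_split (l : List Char) (a : Char) (e : Int) (P R : List Int)
    (hsplit : pvIdxs l a = P ++ R) (hP : ∀ x ∈ P, x < e) (hR : ∀ y ∈ R, e ≤ y) :
    pvLB l a e = P.foldl max 0 := by
  have : (pvIdxs l a).filter (fun s => decide (s < e)) = P := by
    rw [hsplit, List.filter_append]
    rw [List.filter_eq_self.mpr (by intro x hx; simpa using hP x hx),
      List.filter_eq_nil_iff.mpr (by intro y hy; have := hR y hy; simp; omega)]
    simp
  rw [pvLB, this]

-- B's fold over ends computes the running max of pvG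
theorem pvB_fold_char (l : List Char) (a : Char) (n : Int) :
    ∀ (E : List Int) (res L : Int) (R P : List Int),
      pvIdxs l a = P ++ R → L = P.foldl max 0 →
      (∀ x ∈ P, ∀ e ∈ E, x < e) → E.Pairwise (· ≤ ·) →
      (E.foldl (fun (st : Int × Int × List Int) e =>
          let lr := pvAdvance e st.2.1 st.2.2
          (max st.1 (lr.1 + n - 1 - e), lr.1, lr.2)) (res, L, R)).1
        = E.foldl (fun r e => max r (pvG l a n e)) res := by
  intro E
  induction E with
  | nil => intro res L R P _ _ _ _; rfl
  | cons e E ih =>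
    intro res L R P hsplit hL hPE hpw
    obtain ⟨P', hsplit', hP', hL', hR'⟩ :=
      pvAdvance_char l a e R P L hsplit (fun x hx => hPE x hx e (by simp)) hL
    have hlb : (pvAdvance e L R).1 = pvLB l a e := by
      rw [hL', pvLB_of_split l a e P' _ hsplit' hP' hR']
    simp only [List.foldl_cons]
    rw [ih (max res ((pvAdvance e L R).1 + n - 1 - e)) (pvAdvance e L R).1 (pvAdvance e L R).2 P'
      hsplit' hL'
      (by intro x hx e' he'
          have h1 := hP' x hx
          have h2 := (List.pairwise_cons.mp hpw).1 e' he'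
          omega)
      (List.pairwise_cons.mp hpw).2]
    rw [hlb, pvG]

-- pvLB at an end index equals A's s-accumulator value (the latest start index before i)
theorem pvLB_eq_j (l : List Char) (a : Char) (i j : Nat)
    (hja : l.getD j ' ' = a)
    (hmax : ∀ m : Nat, m < i → l.getD m ' ' = a → m ≤ j)
    (hji : j < i) (hjlen : j < l.length) :
    pvLB l a (i : Int) = (j : Int) := by
  have hjmem : (j : Int) ∈ (pvIdxs l a).filter (fun s => decide (s < (i : Int))) := by
    rw [List.mem_filter]
    refine ⟨(pvIdxs_mem l a _).mpr ⟨j, hjlen, rfl, hja⟩, by simp; omega⟩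
  have hlb := (PySem.List.le_foldl_max ((pvIdxs l a).filter (fun s => decide (s < (i : Int)))) (0:Int)).2 _ hjmem
  have hub : ((pvIdxs l a).filter (fun s => decide (s < (i : Int)))).foldl max 0 ≤ (j : Int) := by
    rcases PySem.List.foldl_max_mem ((pvIdxs l a).filter (fun s => decide (s < (i : Int)))) (0:Int) with h | h
    · rw [h]; positivity
    · obtain ⟨hmem, hlt⟩ := List.mem_filter.mp h
      obtain ⟨m, hmlen, hmeq, hma⟩ := (pvIdxs_mem l a _).mp hmem
      have hmi : m < i := by simp at hlt; omega
      have := hmax m hmi hma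
      rw [hmeq]
      exact_mod_cast this
  unfold pvLB
  omega

-- upper bound for the running max of pvG
theorem pvFoldMax_ub (f : Int → Int) (E : List Int) (X : Int) (r : Int) (hr : r ≤ X)
    (H : ∀ e ∈ E, f e ≤ X) : E.foldl (fun r e => max r (f e)) r ≤ X := by
  induction E generalizing r with
  | nil => simpa using hr
  | cons e E ih =>
    simp only [List.foldl_cons]
    exact ih _ (by simp [hr, H e (by simp)]) (fun e' he' => H e' (by simp [he']))

-- main equality, a ≠ b case: both sides are the max of pvG over the end indices
theorem pvLoops_eq (l : List Char) (a b : Char)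
    (hl0 : l.getD 0 ' ' = a) (hab : a ≠ b) :
    (pvFA l a b l.length l.length).1
      = (pvIdxs l b).foldl (fun r e => max r (pvG l a l.length e)) 0 := by
  have key : ∀ i : Nat, i < l.length → l.getD i ' ' = b →
      (pvFA l a b l.length i).2 + (l.length : Int) - 1 - (i : Int) = pvG l a l.length (i : Int) := by
    intro i hilen hib
    have hi1 : 1 ≤ i := by
      rcases Nat.eq_zero_or_pos i with h | h
      · subst h; rw [hl0] at hib; exact absurd hib hab
      · exact h
    obtain ⟨j, hj, hjlt, hja, hjm⟩ := pvFA_s_char l a b (l.length : Int) hl0 i hi1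
    have hlbj := pvLB_eq_j l a i j hja hjm hjlt (by omega)
    rw [pvG, hlbj, hj]
  apply le_antisymm
  · apply pvFA_res_ub l a b _ _ hab
      ((PySem.List.le_foldl_max_int (pvIdxs l b) (pvG l a l.length) 0).1) _ l.length le_rfl
    intro i hilen hib
    rw [key i hilen hib]
    exact (PySem.List.le_foldl_max_int (pvIdxs l b) (pvG l a l.length) 0).2 _
      ((pvIdxs_mem l b _).mpr ⟨i, hilen, rfl, hib⟩)
  · apply pvFoldMax_ub _ _ _ _ (pvFA_res_nonneg l a b _ l.length)
    intro e he
    obtain ⟨i, hilen, rfl, hib⟩ := (pvIdxs_mem l b e).mp he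
    rw [← key i hilen hib]
    exact pvFA_res_lb l a b _ hab l.length i hilen hib

-- ===== VERDICT (by name: the statement is the Claim_ definition above) =====
theorem maximize_score_spec : Claim_equal_maximize_score := by
  intro str _
  simp only [Spec_maximize_score, maximize_score, maximize_score_alt]
  by_cases hnil : str.toList.length = 0
  · simp [hnil]
  · have hlen : 1 ≤ str.toList.length := by omega
    have hInt : ¬ ((str.toList.length : Int) = 0) := by exact_mod_cast hnil
    rw [if_neg hnil, if_neg hInt]
    have hl0 : str.toList.getD 0 ' ' = PySem.List.pyGetD str.toList 0 ' ' := by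
      rw [PySem.List.pyGetD_zero]
    by_cases hab : PySem.List.pyGetD str.toList 0 ' ' = PySem.List.pyGetD str.toList (-1) ' '
    · rw [if_pos hab, pvA_foldl_eq, ← hab]
      exact pvFA_eq_of_eq str.toList _ _ (by exact_mod_cast hlen) _ hlen
    · rw [if_neg hab, pvA_foldl_eq]
      have hfold := pvB_fold_char str.toList (PySem.List.pyGetD str.toList 0 ' ')
        (str.toList.length : Int) (pvIdxs str.toList (PySem.List.pyGetD str.toList (-1) ' '))
        0 0 (pvIdxs str.toList (PySem.List.pyGetD str.toList 0 ' ')) []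
        rfl rfl (by intro x hx; simp at hx)
        ((pvIdxs_sorted _ _).imp le_of_lt)
      rw [pvIdxs, pvIdxs] at hfold
      rw [hfold]
      exact pvLoops_eq str.toList _ _ hl0 hab
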